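-- pv_equiv track=rewrite | github.com/Tink-Bell/StenoBee | 2-filter.py | vowel_breakdown
-- ===== SOURCE A (Python) =====
-- def vowel_breakdown(word):
--     vowels = "aeioyuw"
--     groups = ["aeio", "yuw"]
--     breakdown = []
--     for vowel in vowels:
--         found_in_group = False
--         for group in groups:
--             if vowel in group and vowel in word:
--                 breakdown.append(vowel)
--                 found_in_group = True
--                 break
--         if not found_in_group:
--             breakdown.append("")
--     if "y" in breakdown[4] or "u" in breakdown[4] or "w" in breakdown[4]:
--         breakdown.insert(4, "\t")
--     return "".join(breakdown[:4]) + "\t" + "".join(breakdown[4:])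
-- ===== SOURCE B (Python) =====
-- def vowel_breakdown(word):
--     part1 = ''.join(v for v in 'aeio' if v in word)
--     part2 = ''.join(v for v in 'yuw' if v in word)
--     sep = '\t\t' if 'y' in word else '\t'
--     return part1 + sep + part2
-- ===== Notes on version B (the rewrite author's own statement) =====
-- stated objective: simpler
-- what changed: Replaces the 7-slot list built by nested group loops plus the index-4 tab insertion with two direct filtered joins over 'aeio' and 'yuw' and a separator that is a double tab exactly when 'y' is in the word.
import Mathlib
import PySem

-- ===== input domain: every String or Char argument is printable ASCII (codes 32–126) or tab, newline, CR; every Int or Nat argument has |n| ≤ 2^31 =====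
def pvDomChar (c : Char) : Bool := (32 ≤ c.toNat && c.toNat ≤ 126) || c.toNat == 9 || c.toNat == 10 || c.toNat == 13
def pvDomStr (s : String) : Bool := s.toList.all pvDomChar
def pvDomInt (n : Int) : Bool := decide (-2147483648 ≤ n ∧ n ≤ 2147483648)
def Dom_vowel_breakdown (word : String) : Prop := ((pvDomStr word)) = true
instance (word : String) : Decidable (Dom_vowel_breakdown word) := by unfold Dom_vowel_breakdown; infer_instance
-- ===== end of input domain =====

-- B replaces A's 7-slot list, nested group loops and index-4 tab insertion by two
-- direct filtered joins and a double-tab separator when 'y' occurs (objective: simpler).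

-- ===== PORT A =====
-- Python string concatenation s1 + s2 is ported via PySem.Str.join "" (exact).
def vowel_breakdown (word : String) : String :=
  let vowels : List String := ["a", "e", "i", "o", "y", "u", "w"]
  let groups : List String := ["aeio", "yuw"]
  -- inner 'for group in groups: if … : append; break' = first group hit, else append ""
  let breakdown : List String := vowels.foldl (fun bd vowel =>
    match groups.find? (fun g => PySem.Str.isIn vowel g && PySem.Str.isIn vowel word) with
    | some _ => bd ++ [vowel]
    | none   => bd ++ [""]) []
  let b4 := breakdown.getD 4 ""
  let breakdown :=
    if PySem.Str.isIn "y" b4 || PySem.Str.isIn "u" b4 || PySem.Str.isIn "w" b4 then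
      PySem.List.insert breakdown (4 : Int) "\t"
    else breakdown
  PySem.Str.join "" [PySem.Str.join "" (PySem.List.slice breakdown none (some 4)), "\t",
                     PySem.Str.join "" (PySem.List.slice breakdown (some 4) none)]

-- ===== PORT B =====
def vowel_breakdown_alt (word : String) : String :=
  let part1 := PySem.Str.join "" (["a", "e", "i", "o"].filter (fun v => PySem.Str.isIn v word))
  let part2 := PySem.Str.join "" (["y", "u", "w"].filter (fun v => PySem.Str.isIn v word))
  let sep := if PySem.Str.isIn "y" word then "\t\t" else "\t"
  PySem.Str.join "" [part1, sep, part2]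

-- ===== PRECONDITION & SPEC =====
def Spec_vowel_breakdown (word : String) (out : String) : Prop := out = vowel_breakdown_alt word
instance (word : String) (out : String) : Decidable (Spec_vowel_breakdown word out) := by unfold Spec_vowel_breakdown; infer_instance

-- ===== CLAIM (what is proved, stated in full; the proofs are below) =====
def Claim_equal_vowel_breakdown : Prop := ∀ (word : String), Dom_vowel_breakdown word → Spec_vowel_breakdown word (vowel_breakdown word)

-- ===== LEMMAS AND PROOFS =====

-- ===== VERDICT (by name: the statement is the Claim_ definition above) =====
set_option maxHeartbeats 2000000 in
theorem vowel_breakdown_spec : Claim_equal_vowel_breakdown := by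
  intro word _
  unfold Spec_vowel_breakdown vowel_breakdown vowel_breakdown_alt
  simp only [List.foldl_cons, List.foldl_nil, List.filter_cons, List.filter_nil]
  generalize PySem.Str.isIn "a" word = ba
  generalize PySem.Str.isIn "e" word = be
  generalize PySem.Str.isIn "i" word = bi
  generalize PySem.Str.isIn "o" word = bo
  generalize PySem.Str.isIn "y" word = by_
  generalize PySem.Str.isIn "u" word = bu
  generalize PySem.Str.isIn "w" word = bw
  revert ba be bi bo by_ bu bw
  decide
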